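-- pv_equiv track=rewrite | github.com/manwar/perlweeklychallenge-club | challenge-334/packy-anderson/python/ch-2.py | nvp
-- ===== SOURCE A (Python) =====
-- from collections import Counter
--
-- def manhattan_distance(a, b):
--   return (
--     abs(a[0] - b[0]) + abs(a[1] - b[1]),
--     f'|{a[0]} - {b[0]}| + |{a[1]} - {b[1]}|'
--   )
--
-- def format_point(p):
--   return f'[{p[0]}, {p[1]}]'
--
-- def nvp(x, y, points):
--   explanation = ''
--
--   # find the "valid" points
--   valid = Counter()
--   for i in range(len(points)):
--     if points[i][0] == x or points[i][1] == y:
--       valid[i] = 1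
--   if len(valid) == 0:
--     return (-1, f'No point shares x or y with ({x}, {y}).')
--
--   if (len(valid) == len(points)):
--     explanation = 'Valid points: all of them'
--   else:
--     vpoints = [ format_point(points[i]) for i in valid.keys() ]
--     explanation = 'Valid points: ' + ', '.join(vpoints)
--
--   # now find the distances from the valid points to (x,y)
--   explanation += '\n\nManhattan distances:\n'
--   dist = {}
--   for i in range(len(points)):
--     if valid[i]:
--       d, e = manhattan_distance([x, y], points[i])
--       explanation += (
--         "    " + format_point(points[i]) + f' => {e} => {d}\n'
--       )
--       # add the index to a list for this distance
--       # get the existing list in d, default to empty list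
--       l = dist.setdefault(d, [])
--       l.append(i)
--
--   # the minimum key in the dist dict is the minimum distance
--   min_val = min(dist.keys())
--
--   # pick the lowest index from the min distance array
--   i = dist[min_val][0]
--
--   if len(dist[min_val]) == 1:  # only one min distance
--     explanation += (
--       '\nClosest valid point is ' + format_point(points[i]) +
--       f' at index {i}.'
--     )
--   elif len(dist[min_val]) < len(valid):
--     tie_list = [ str(n) for n in dist[min_val] ]
--     explanation += (
--       '\nTie between index ' + ' and '.join(tie_list) +
--       f', pick the smaller index: {i}.'
--     )
--   else:
--     explanation += (
--       f'\nAll tie, return the one with the lowest index: {i}.'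
--     )
--
--   return (i, explanation)
-- ===== SOURCE B (Python) =====
-- def _format_point(p):
--     return f'[{p[0]}, {p[1]}]'
--
--
-- def _line(x, y, p):
--     d = abs(x - p[0]) + abs(y - p[1])
--     e = f'|{x} - {p[0]}| + |{y} - {p[1]}|'
--     return '    ' + _format_point(p) + f' => {e} => {d}\n'
--
--
-- def nvp(x, y, points):
--     # one list of valid indices + a running-minimum pass (no Counter, no dict)
--     valid = [i for i, (px, py) in enumerate(points) if px == x or py == y]
--     if not valid:
--         return (-1, f'No point shares x or y with ({x}, {y}).')
--
--     if len(valid) == len(points):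
--         header = 'Valid points: all of them'
--     else:
--         header = 'Valid points: ' + ', '.join(_format_point(points[i]) for i in valid)
--
--     lines = [_line(x, y, points[i]) for i in valid]
--
--     best = None
--     best_idxs = []
--     for i in valid:
--         d = abs(x - points[i][0]) + abs(y - points[i][1])
--         if best is None or d < best:
--             best, best_idxs = d, [i]
--         elif d == best:
--             best_idxs.append(i)
--
--     i0 = best_idxs[0]
--     if len(best_idxs) == 1:
--         tail = ('\nClosest valid point is ' + _format_point(points[i0]) +
--                 f' at index {i0}.')
--     elif len(best_idxs) < len(valid):
--         tail = ('\nTie between index ' + ' and '.join(str(n) for n in best_idxs) +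
--                 f', pick the smaller index: {i0}.')
--     else:
--         tail = f'\nAll tie, return the one with the lowest index: {i0}.'
--     return (i0, header + '\n\nManhattan distances:\n' + ''.join(lines) + tail)
-- ===== Notes on version B (the rewrite author's own statement) =====
-- stated objective: simpler
-- what changed: Replaces the Counter of valid indices and the dict keyed by distance (grouping indices per distance, then min over keys) by a plain list of valid indices and a single running-minimum pass that keeps the current best distance and the list of indices tied at it.
import Mathlib
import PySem

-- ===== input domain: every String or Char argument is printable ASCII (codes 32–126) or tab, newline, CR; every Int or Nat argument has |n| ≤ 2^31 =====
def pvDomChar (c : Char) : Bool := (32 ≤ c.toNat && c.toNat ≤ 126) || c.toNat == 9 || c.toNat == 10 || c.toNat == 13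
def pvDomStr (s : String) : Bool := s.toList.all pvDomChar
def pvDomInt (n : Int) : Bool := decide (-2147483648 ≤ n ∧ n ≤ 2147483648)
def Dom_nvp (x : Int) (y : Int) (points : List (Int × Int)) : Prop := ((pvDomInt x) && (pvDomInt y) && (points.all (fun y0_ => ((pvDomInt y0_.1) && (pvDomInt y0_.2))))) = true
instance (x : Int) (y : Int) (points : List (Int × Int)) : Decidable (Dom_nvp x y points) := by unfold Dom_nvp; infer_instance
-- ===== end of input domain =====

-- B replaces A's Counter of valid indices and distance-keyed dict (grouping indices per
-- distance, then min over the dict's keys) by a plain index list and one running-minimum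
-- pass keeping the best distance and the indices tied at it; objective: simpler.

-- ===== PORT A =====
def pvFormatPoint (p : Int × Int) : String :=
  "[" ++ PySem.Int.toStr p.1 ++ ", " ++ PySem.Int.toStr p.2 ++ "]"

def pvManhattan (a : Int × Int) (b : Int × Int) : Int × String :=
  (|a.1 - b.1| + |a.2 - b.2|,
   "|" ++ PySem.Int.toStr a.1 ++ " - " ++ PySem.Int.toStr b.1 ++ "| + |" ++
     PySem.Int.toStr a.2 ++ " - " ++ PySem.Int.toStr b.2 ++ "|")

-- indices fed to points[i] below are always in range, so the pyGetD default is never used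
def nvp (x : Int) (y : Int) (points : List (Int × Int)) : Int × String :=
  let valid : PySem.Dict Int Int :=
    (PySem.List.pyRange 0 points.length 1).foldl
      (fun d i =>
        let p := PySem.List.pyGetD points i (0, 0)
        if p.1 == x || p.2 == y then d.insert i 1 else d)
      PySem.Dict.empty
  if valid.size == 0 then
    (-1, "No point shares x or y with (" ++ PySem.Int.toStr x ++ ", " ++ PySem.Int.toStr y ++ ").")
  else
    let explanation :=
      if valid.size == points.length then "Valid points: all of them"
      else "Valid points: " ++ PySem.Str.join ", "
             (valid.keys.map (fun i => pvFormatPoint (PySem.List.pyGetD points i (0, 0))))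
    let explanation := explanation ++ "\n\nManhattan distances:\n"
    let st :=
      (PySem.List.pyRange 0 points.length 1).foldl
        (fun (s : String × PySem.Dict Int (List Int)) i =>
          if valid.getD i 0 != 0 then
            let p := PySem.List.pyGetD points i (0, 0)
            let de := pvManhattan (x, y) p
            (s.1 ++ "    " ++ pvFormatPoint p ++ " => " ++ de.2 ++ " => " ++ PySem.Int.toStr de.1 ++ "\n",
             s.2.modify de.1 [] (fun l => l ++ [i]))
          else s)
        (explanation, PySem.Dict.empty)
    let dist := st.2
    -- dist is nonempty here, so Python's min() never raises and mlist is nonempty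
    let min_val := (PySem.List.min? dist.keys (fun v => v)).getD 0
    let mlist := dist.getD min_val []
    let i := PySem.List.pyGetD mlist 0 0
    if mlist.length == 1 then
      (i, st.1 ++ "\nClosest valid point is " ++ pvFormatPoint (PySem.List.pyGetD points i (0, 0)) ++
            " at index " ++ PySem.Int.toStr i ++ ".")
    else if mlist.length < valid.size then
      (i, st.1 ++ "\nTie between index " ++ PySem.Str.join " and " (mlist.map PySem.Int.toStr) ++
            ", pick the smaller index: " ++ PySem.Int.toStr i ++ ".")
    else
      (i, st.1 ++ "\nAll tie, return the one with the lowest index: " ++ PySem.Int.toStr i ++ ".")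

-- ===== PORT B =====
def pvLine (x : Int) (y : Int) (p : Int × Int) : String :=
  let d := |x - p.1| + |y - p.2|
  let e := "|" ++ PySem.Int.toStr x ++ " - " ++ PySem.Int.toStr p.1 ++ "| + |" ++
             PySem.Int.toStr y ++ " - " ++ PySem.Int.toStr p.2 ++ "|"
  "    " ++ pvFormatPoint p ++ " => " ++ e ++ " => " ++ PySem.Int.toStr d ++ "\n"

def nvp_alt (x : Int) (y : Int) (points : List (Int × Int)) : Int × String :=
  let valid : List Int :=
    (((List.range points.length).zip points).filter
        (fun ip => ip.2.1 == x || ip.2.2 == y)).map (fun ip => (ip.1 : Int))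
  if valid.isEmpty then
    (-1, "No point shares x or y with (" ++ PySem.Int.toStr x ++ ", " ++ PySem.Int.toStr y ++ ").")
  else
    let header :=
      if valid.length == points.length then "Valid points: all of them"
      else "Valid points: " ++ PySem.Str.join ", "
             (valid.map (fun i => pvFormatPoint (PySem.List.pyGetD points i (0, 0))))
    let lines := valid.map (fun i => pvLine x y (PySem.List.pyGetD points i (0, 0)))
    let best := valid.foldl
      (fun (s : Option Int × List Int) i =>
        let d := |x - (PySem.List.pyGetD points i (0, 0)).1| + |y - (PySem.List.pyGetD points i (0, 0)).2|
        match s.1 with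
        | none => (some d, [i])
        | some b => if d < b then (some d, [i]) else if d == b then (some b, s.2 ++ [i]) else s)
      (none, [])
    let bestIdxs := best.2
    let i0 := PySem.List.pyGetD bestIdxs 0 0
    let tail :=
      if bestIdxs.length == 1 then
        "\nClosest valid point is " ++ pvFormatPoint (PySem.List.pyGetD points i0 (0, 0)) ++
          " at index " ++ PySem.Int.toStr i0 ++ "."
      else if bestIdxs.length < valid.length then
        "\nTie between index " ++ PySem.Str.join " and " (bestIdxs.map PySem.Int.toStr) ++
          ", pick the smaller index: " ++ PySem.Int.toStr i0 ++ "."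
      else
        "\nAll tie, return the one with the lowest index: " ++ PySem.Int.toStr i0 ++ "."
    (i0, header ++ "\n\nManhattan distances:\n" ++ PySem.Str.join "" lines ++ tail)

-- ===== PRECONDITION & SPEC =====
def Spec_nvp (x : Int) (y : Int) (points : List (Int × Int)) (out : Int × String) : Prop := out = nvp_alt x y points
instance (x : Int) (y : Int) (points : List (Int × Int)) (out : Int × String) : Decidable (Spec_nvp x y points out) := by unfold Spec_nvp; infer_instance

-- ===== CLAIM (what is proved, stated in full; the proofs are below) =====
def Claim_equal_nvp : Prop := ∀ (x : Int) (y : Int) (points : List (Int × Int)), Dom_nvp x y points → Spec_nvp x y points (nvp x y points)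

-- ===== LEMMAS AND PROOFS =====

-- the list of valid indices, in increasing order
def pvVs (x : Int) (y : Int) (points : List (Int × Int)) : List Int :=
  ((List.range points.length).filter
      (fun k => (points.getD k (0, 0)).1 == x || (points.getD k (0, 0)).2 == y)).map
    (fun k : Nat => (k : Int))

lemma pvVs_nodup (x y : Int) (points : List (Int × Int)) : (pvVs x y points).Nodup :=
  (List.nodup_range.filter _).map (fun a b h => by exact_mod_cast h)

lemma pvA_filter1 (x y : Int) (points : List (Int × Int)) :
    (PySem.List.pyRange 0 (points.length : Int) 1).filter
      (fun i => (PySem.List.pyGetD points i (0, 0)).1 == x || (PySem.List.pyGetD points i (0, 0)).2 == y)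
    = pvVs x y points := by
  rw [PySem.List.pyRange_zero_natCast, List.filter_map]
  simp only [pvVs, Function.comp_def, PySem.List.pyGetD_natCast]

lemma pvMemVs (x y : Int) (points : List (Int × Int)) (k : Nat) :
    ((k : Int) ∈ pvVs x y points) ↔
      (k < points.length ∧ ((points.getD k (0, 0)).1 == x || (points.getD k (0, 0)).2 == y) = true) := by
  simp only [pvVs, List.mem_map, List.mem_filter, List.mem_range]
  constructor
  · rintro ⟨k', ⟨hk, hc⟩, he⟩
    have : k' = k := by exact_mod_cast he
    subst this; exact ⟨hk, hc⟩
  · intro ⟨hk, hc⟩; exact ⟨k, ⟨hk, hc⟩, rfl⟩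

lemma pvA_items (x y : Int) (points : List (Int × Int)) :
    ((PySem.List.pyRange 0 (points.length : Int) 1).foldl
      (fun d i =>
        if (PySem.List.pyGetD points i (0, 0)).1 == x || (PySem.List.pyGetD points i (0, 0)).2 == y
        then d.insert i 1 else d)
      (PySem.Dict.empty : PySem.Dict Int Int)).items
    = (pvVs x y points).map (fun i => (i, (1 : Int))) := by
  rw [PySem.List.foldl_if_eq_foldl_filter, pvA_filter1]
  rw [PySem.Dict.items_foldl_insert_fresh (pvVs x y points) (fun i => i) (fun _ => (1 : Int))
        PySem.Dict.empty (by intro a _; simp [PySem.Dict.contains_empty])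
        (by simpa using pvVs_nodup x y points)]
  simp [show (PySem.Dict.empty : PySem.Dict Int Int).items = [] from rfl]

lemma pvA_keys (x y : Int) (points : List (Int × Int)) :
    ((PySem.List.pyRange 0 (points.length : Int) 1).foldl
      (fun d i =>
        if (PySem.List.pyGetD points i (0, 0)).1 == x || (PySem.List.pyGetD points i (0, 0)).2 == y
        then d.insert i 1 else d)
      (PySem.Dict.empty : PySem.Dict Int Int)).keys
    = pvVs x y points := by
  unfold PySem.Dict.keys
  rw [pvA_items, List.map_map]
  show List.map ((fun x => x.1) ∘ fun i => (i, (1 : Int))) (pvVs x y points) = pvVs x y points ; simp [Function.comp_def]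

lemma pvA_size (x y : Int) (points : List (Int × Int)) :
    ((PySem.List.pyRange 0 (points.length : Int) 1).foldl
      (fun d i =>
        if (PySem.List.pyGetD points i (0, 0)).1 == x || (PySem.List.pyGetD points i (0, 0)).2 == y
        then d.insert i 1 else d)
      (PySem.Dict.empty : PySem.Dict Int Int)).size
    = (pvVs x y points).length := by
  unfold PySem.Dict.size
  rw [pvA_items, List.length_map]

lemma pvA_getD (x y : Int) (points : List (Int × Int)) (i : Int) :
    ((PySem.List.pyRange 0 (points.length : Int) 1).foldl
      (fun d i =>
        if (PySem.List.pyGetD points i (0, 0)).1 == x || (PySem.List.pyGetD points i (0, 0)).2 == y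
        then d.insert i 1 else d)
      (PySem.Dict.empty : PySem.Dict Int Int)).getD i 0
    = if i ∈ pvVs x y points then 1 else 0 := by
  by_cases h : i ∈ pvVs x y points
  · rw [if_pos h]
    refine PySem.Dict.getD_of_mem_items _ ?_ ?_ 0
    · rw [pvA_items]; exact List.mem_map.mpr ⟨i, h, rfl⟩
    · rw [pvA_keys]; exact pvVs_nodup x y points
  · rw [if_neg h]
    refine PySem.Dict.getD_of_not_contains _ 0 ?_
    rw [PySem.Dict.contains_eq_decide_mem_keys, pvA_keys]
    simpa using h

lemma pvA_filter2 (x y : Int) (points : List (Int × Int)) :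
    (PySem.List.pyRange 0 (points.length : Int) 1).filter
      (fun i =>
        ((PySem.List.pyRange 0 (points.length : Int) 1).foldl
          (fun d i =>
            if (PySem.List.pyGetD points i (0, 0)).1 == x || (PySem.List.pyGetD points i (0, 0)).2 == y
            then d.insert i 1 else d)
          (PySem.Dict.empty : PySem.Dict Int Int)).getD i 0 != 0)
    = pvVs x y points := by
  rw [← pvA_filter1 x y points]
  refine List.filter_congr ?_
  intro i hi
  rw [PySem.List.pyRange_zero_natCast] at hi
  obtain ⟨k, hk, rfl⟩ := List.mem_map.mp hi
  rw [pvA_getD]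
  by_cases h : (k : Int) ∈ pvVs x y points
  · have hc := ((pvMemVs x y points k).mp h).2
    rw [if_pos h, PySem.List.pyGetD_natCast, hc]; rfl
  · have hc : ((points.getD k (0, 0)).1 == x || (points.getD k (0, 0)).2 == y) = false := by
      cases hcv : ((points.getD k (0, 0)).1 == x || (points.getD k (0, 0)).2 == y) with
      | false => rfl
      | true => exact absurd ((pvMemVs x y points k).mpr ⟨List.mem_range.mp hk, hcv⟩) h
    rw [if_neg h, PySem.List.pyGetD_natCast, hc]; rfl

lemma pvA_loop2 {σ : Type} (x y : Int) (points : List (Int × Int)) (G : σ → Int → σ) (init : σ) :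
    (PySem.List.pyRange 0 (points.length : Int) 1).foldl
      (fun s i =>
        if ((PySem.List.pyRange 0 (points.length : Int) 1).foldl
              (fun d i =>
                if (PySem.List.pyGetD points i (0, 0)).1 == x || (PySem.List.pyGetD points i (0, 0)).2 == y
                then d.insert i 1 else d)
              (PySem.Dict.empty : PySem.Dict Int Int)).getD i 0 != 0
        then G s i else s)
      init
    = (pvVs x y points).foldl G init := by
  rw [PySem.List.foldl_if_eq_foldl_filter, pvA_filter2]

lemma pvB_valid (x y : Int) (points : List (Int × Int)) :
    ((((List.range points.length).zip points).filter
        (fun ip => ip.2.1 == x || ip.2.2 == y)).map (fun ip => (ip.1 : Int)))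
    = pvVs x y points := by
  have hz : (List.range points.length).zip points
      = (List.range points.length).map (fun k => (k, points.getD k (0, 0))) := by
    apply List.ext_getElem
    · simp
    · intro n h1 h2
      simp only [List.getElem_zip, List.getElem_map, List.getElem_range]
      have hn : n < points.length := by simpa using h2
      rw [List.getD_eq_getElem points (0, 0) hn]
  rw [hz, List.filter_map, List.map_map]
  simp only [pvVs, Function.comp_def]

lemma pvJoinCons (a : String) (t : List String) :
    PySem.Str.join "" (a :: t) = a ++ PySem.Str.join "" t := by
  have h : ∀ (c : List Char) (r : List (List Char)),
      List.intercalate [] (c :: r) = c ++ List.intercalate [] r := by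
    intro c r; cases r <;> simp [List.intercalate, List.intersperse]
  simp only [PySem.Str.join, PySem.Chars.join, List.map_cons,
    show ("" : String).toList = [] from rfl, h, String.ofList_append, String.ofList_toList]

lemma pvFoldStr (f : Int → String) (l : List Int) :
    ∀ (s : String), l.foldl (fun e i => e ++ f i) s = s ++ PySem.Str.join "" (l.map f) := by
  induction l with
  | nil =>
    intro s
    simp only [List.foldl_nil, List.map_nil]
    rw [show PySem.Str.join "" ([] : List String) = "" from rfl, String.append_empty]
  | cons a t ih =>
    intro s
    simp only [List.foldl_cons, List.map_cons, pvJoinCons, ih, String.append_assoc]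

lemma pvDistKeys (f : Int → Int) (vs : List Int) :
    (vs.foldl (fun d i => d.modify (f i) [] (fun l => l ++ [i]))
      (PySem.Dict.empty : PySem.Dict Int (List Int))).keys
    = PySem.Set.ofList (vs.map f) := by
  rw [PySem.Dict.keys_foldl_modify_key vs f [] (fun _ i => fun l => l ++ [i])]
  rw [PySem.Dict.keys_empty, PySem.Set.ofList_eq_foldl]
  rfl

lemma pvDistGetD (f : Int → Int) (vs : List Int) (c : Int) :
    (vs.foldl (fun d i => d.modify (f i) [] (fun l => l ++ [i]))
      (PySem.Dict.empty : PySem.Dict Int (List Int))).getD c []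
    = vs.filter (fun i => f i == c) := by
  have h : vs.foldl (fun d i => d.modify (f i) [] (fun l => l ++ [i]))
        (PySem.Dict.empty : PySem.Dict Int (List Int))
      = (vs.map (fun i => (f i, i))).foldl
          (fun d p => d.modify p.1 [] (fun l => l ++ [p.2])) PySem.Dict.empty := by
    rw [List.foldl_map]
  rw [h, PySem.Dict.getD_foldl_modify_append, List.filter_map, List.map_map]
  simp [Function.comp_def]

lemma pvMinSet (L : List Int) (m : Int) (hm : m ∈ L) (hmin : ∀ z ∈ L, m ≤ z) :
    PySem.List.min? (PySem.Set.ofList L) (fun v => v) = some m := by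
  cases h : PySem.List.min? (PySem.Set.ofList L) (fun v => v) with
  | none =>
    rw [PySem.List.min?_eq_none_iff] at h
    have := (PySem.Set.mem_ofList L m).mpr hm
    rw [h] at this; simp at this
  | some m' =>
    have h1 := PySem.List.min?_mem h
    have h2 := PySem.List.min?_isMin h m ((PySem.Set.mem_ofList L m).mpr hm)
    have h3 := hmin m' ((PySem.Set.mem_ofList L m').mp h1)
    have : m' = m := le_antisymm h2 h3
    rw [this]

lemma pvRunMin (f : Int → Int) : ∀ (l : List Int) (b : Int) (acc : List Int),
    l.foldl
      (fun (s : Option Int × List Int) i =>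
        match s.1 with
        | none => (some (f i), [i])
        | some b' => if f i < b' then (some (f i), [i])
                     else if f i == b' then (some b', s.2 ++ [i]) else s)
      (some b, acc)
    = (some ((l.map f).foldl min b),
       (if (l.map f).foldl min b = b then acc else []) ++
         l.filter (fun i => f i == (l.map f).foldl min b)) := by
  intro l
  induction l with
  | nil => intro b acc; simp
  | cons a t ih =>
    intro b acc
    simp only [List.foldl_cons, List.map_cons]
    by_cases h1 : f a < b
    · rw [if_pos h1, ih (f a) [a]]
      simp only [show min b (f a) = f a from by omega]
      have hle := (PySem.List.foldl_min_le (t.map f) (f a)).1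
      have hne : List.foldl min (f a) (t.map f) ≠ b := by omega
      rw [if_neg hne, List.filter_cons]
      by_cases h2 : List.foldl min (f a) (t.map f) = f a
      · rw [if_pos h2, if_pos (show (f a == List.foldl min (f a) (t.map f)) = true from
          by simpa using h2.symm)]
        simp
      · rw [if_neg h2, if_neg (show ¬((f a == List.foldl min (f a) (t.map f)) = true) from
          by simp; omega)]
    · by_cases h2 : f a = b
      · rw [if_neg h1, if_pos (show (f a == b) = true from by simpa using h2),
            ih b (acc ++ [a])]
        simp only [show min b (f a) = b from by omega]
        rw [List.filter_cons]
        by_cases h3 : List.foldl min b (t.map f) = b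
        · rw [if_pos h3, if_pos h3, if_pos (show (f a == List.foldl min b (t.map f)) = true from
            by simp [h2, h3])]
          simp
        · have hle := (PySem.List.foldl_min_le (t.map f) b).1
          rw [if_neg h3, if_neg h3, if_neg (show ¬((f a == List.foldl min b (t.map f)) = true) from
            by simp; omega)]
      · rw [if_neg h1, if_neg (show ¬((f a == b) = true) from by simpa using h2),
            ih b acc]
        simp only [show min b (f a) = b from by omega]
        rw [List.filter_cons]
        have hle := (PySem.List.foldl_min_le (t.map f) b).1
        rw [if_neg (show ¬((f a == List.foldl min b (t.map f)) = true) from by simp; omega)]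

lemma pvFilterSplit (f : Int → Int) (hd : Int) (t : List Int) (m : Int) :
    (if m = f hd then [hd] else []) ++ t.filter (fun i => f i == m)
    = (hd :: t).filter (fun i => f i == m) := by
  rw [List.filter_cons]
  by_cases h : m = f hd
  · rw [if_pos h, if_pos (show (f hd == m) = true from by simpa using h.symm)]; rfl
  · rw [if_neg h, if_neg (show ¬((f hd == m) = true) from by simp; omega)]; rfl

lemma pvMain (x y : Int) (points : List (Int × Int)) : nvp x y points = nvp_alt x y points := by
  simp only [nvp, nvp_alt]
  rw [pvB_valid, pvA_size, pvA_keys, pvA_loop2]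
  rw [PySem.List.foldl_prod_mk
        (f := fun (s1 : String) (i : Int) => s1 ++ "    " ++ pvFormatPoint (PySem.List.pyGetD points i (0, 0)) ++ " => " ++
            (pvManhattan (x, y) (PySem.List.pyGetD points i (0, 0))).2 ++ " => " ++
            PySem.Int.toStr (pvManhattan (x, y) (PySem.List.pyGetD points i (0, 0))).1 ++ "\n")
        (g := fun (s2 : PySem.Dict Int (List Int)) (i : Int) => s2.modify (pvManhattan (x, y) (PySem.List.pyGetD points i (0, 0))).1 [] fun l => l ++ [i])]
  simp only [pvManhattan]
  rw [pvDistKeys (fun i => |x - (PySem.List.pyGetD points i (0, 0)).1| + |y - (PySem.List.pyGetD points i (0, 0)).2|) (pvVs x y points)]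
  rw [pvDistGetD (fun i => |x - (PySem.List.pyGetD points i (0, 0)).1| + |y - (PySem.List.pyGetD points i (0, 0)).2|) (pvVs x y points)]
  rw [PySem.List.foldl_congr_mem (pvVs x y points)
      (fun (s1 : String) (i : Int) => s1 ++ "    " ++ pvFormatPoint (PySem.List.pyGetD points i (0, 0)) ++ " => " ++
          ("|" ++ PySem.Int.toStr x ++ " - " ++ PySem.Int.toStr (PySem.List.pyGetD points i (0, 0)).1 ++ "| + |" ++
            PySem.Int.toStr y ++ " - " ++ PySem.Int.toStr (PySem.List.pyGetD points i (0, 0)).2 ++ "|") ++ " => " ++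
          PySem.Int.toStr (|x - (PySem.List.pyGetD points i (0, 0)).1| + |y - (PySem.List.pyGetD points i (0, 0)).2|) ++ "\n")
      (fun (s1 : String) (i : Int) => s1 ++ pvLine x y (PySem.List.pyGetD points i (0, 0)))
      _ (by intro acc i _; simp [pvLine, String.append_assoc])]
  rw [pvFoldStr (fun i => pvLine x y (PySem.List.pyGetD points i (0, 0))) (pvVs x y points)]
  cases hvs : pvVs x y points with
  | nil => simp
  | cons hd t =>
    set F : Int → Int :=
      fun i => |x - (PySem.List.pyGetD points i (0, 0)).1| + |y - (PySem.List.pyGetD points i (0, 0)).2| with hF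
    have hmem : List.foldl min (F hd) (t.map F) ∈ List.map F (hd :: t) := by
      rw [List.map_cons]
      rcases PySem.List.foldl_min_mem (t.map F) (F hd) with h | h
      · rw [h]; exact List.mem_cons_self
      · exact List.mem_cons_of_mem _ h
    have hbnd : ∀ z ∈ List.map F (hd :: t), List.foldl min (F hd) (t.map F) ≤ z := by
      intro z hz
      rw [List.map_cons] at hz
      rcases List.mem_cons.mp hz with h | h
      · rw [h]; exact (PySem.List.foldl_min_le (t.map F) (F hd)).1
      · exact (PySem.List.foldl_min_le (t.map F) (F hd)).2 z h
    rw [pvMinSet (List.map F (hd :: t)) _ hmem hbnd]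
    simp only [Option.getD_some]
    simp only [List.foldl_cons]
    rw [pvRunMin F t (F hd) [hd]]
    rw [pvFilterSplit F hd t (List.foldl min (F hd) (t.map F))]
    simp only [hF, String.append_assoc, List.length_cons, List.isEmpty_cons,
      show ((t.length + 1 : Nat) == 0) = false from by simp]
    split_ifs <;> rfl

-- ===== VERDICT (by name: the statement is the Claim_ definition above) =====
theorem nvp_spec : Claim_equal_nvp := by
  intro x y points _
  show nvp x y points = nvp_alt x y points
  exact pvMain x y points
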